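-- pv_equiv track=rewrite | github.com/SanderTheDragon/scppl | libraries/os/tools/generate_platform.py | format_defined
-- ===== SOURCE A (Python) =====
-- def format_defined(items: list[str], indent: int) -> str:
--     def define(item):
--         if '&&' not in item:
--             return f'defined({item})'
--
--         s = ' && '.join([ define(subitem) for subitem in item.split('&&') ])
--         return f'({s})'
--
--     joiner = ' || \\\n' + (' ' * indent)
--     return joiner.join([ define(item) for item in items ])
-- ===== SOURCE B (Python) =====
-- def format_defined(items: list[str], indent: int) -> str:
--     # flat, non-recursive formatter: split('&&') parts can contain no '&&',
--     # so each part maps directly to 'defined(part)'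
--     joiner = ' || \\\n' + ' ' * indent
--     out = []
--     for item in items:
--         if '&&' in item:
--             out.append('(' + ' && '.join('defined(' + p + ')' for p in item.split('&&')) + ')')
--         else:
--             out.append('defined(' + item + ')')
--     return joiner.join(out)
-- ===== Notes on version B (the rewrite author's own statement) =====
-- stated objective: simpler
-- what changed: Replaced the self-recursive helper with a flat single-pass formatter: since split('&&') leaves no '&&' in any part, each part is mapped directly to 'defined(part)' with no recursion.
import Mathlib
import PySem

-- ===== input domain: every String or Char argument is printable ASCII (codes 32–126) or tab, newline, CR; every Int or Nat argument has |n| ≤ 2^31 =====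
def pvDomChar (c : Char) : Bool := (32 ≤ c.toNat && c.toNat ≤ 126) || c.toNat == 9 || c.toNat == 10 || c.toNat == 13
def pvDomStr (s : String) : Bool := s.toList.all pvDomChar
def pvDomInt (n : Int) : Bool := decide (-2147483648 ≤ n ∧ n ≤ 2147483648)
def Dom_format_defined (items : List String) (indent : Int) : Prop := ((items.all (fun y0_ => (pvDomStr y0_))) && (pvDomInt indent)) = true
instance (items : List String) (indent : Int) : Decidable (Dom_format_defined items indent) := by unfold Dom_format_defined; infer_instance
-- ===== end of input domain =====

-- B replaces A's self-recursive helper by a flat one-pass formatter (objective: simpler).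

-- ===== PORT A =====
-- A's inner `define` is recursive; the port carries a fuel argument (item.length + 1 at
-- the call site, always sufficient) solely to make the same computation total.
def defineA (fuel : Nat) (item : List Char) : List Char :=
  match fuel with
  | 0 => []
  | fuel + 1 =>
    if PySem.Chars.isIn "&&".toList item = false then
      "defined(".toList ++ item ++ [')']
    else
      let s := PySem.Chars.join " && ".toList
        ((PySem.Chars.splitOn item "&&".toList).map (defineA fuel))
      '(' :: (s ++ [')'])

def format_defined (items : List String) (indent : Int) : String :=
  let joiner := " || \\\n".toList ++ List.replicate indent.toNat ' '
  String.ofList (PySem.Chars.join joiner (items.map (fun item => defineA (item.toList.length + 1) item.toList)))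

-- ===== PORT B =====
def defineB (item : List Char) : List Char :=
  if PySem.Chars.isIn "&&".toList item then
    '(' :: (PySem.Chars.join " && ".toList
      ((PySem.Chars.splitOn item "&&".toList).map
        (fun p => "defined(".toList ++ p ++ [')']))) ++ [')']
  else
    "defined(".toList ++ item ++ [')']

def format_defined_alt (items : List String) (indent : Int) : String :=
  let joiner := " || \\\n".toList ++ List.replicate indent.toNat ' '
  String.ofList (PySem.Chars.join joiner (items.map (fun item => defineB item.toList)))

-- ===== PRECONDITION & SPEC =====
def Spec_format_defined (items : List String) (indent : Int) (out : String) : Prop := out = format_defined_alt items indent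
instance (items : List String) (indent : Int) (out : String) : Decidable (Spec_format_defined items indent out) := by unfold Spec_format_defined; infer_instance

-- ===== CLAIM (what is proved, stated in full; the proofs are below) =====
def Claim_equal_format_defined : Prop := ∀ (items : List String) (indent : Int), Dom_format_defined items indent → Spec_format_defined items indent (format_defined items indent)

-- ===== LEMMAS AND PROOFS =====

-- suffixes of a list ending in c are [] or t ++ [c] with t a suffix of the front
theorem suffix_concat_struct (t' xs : List Char) (c : Char) (h : t' <:+ xs ++ [c])
    (hne : t' ≠ []) : ∃ t, t <:+ xs ∧ t' = t ++ [c] := by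
  rcases h with ⟨pre, hpre⟩
  rcases List.eq_nil_or_concat t' with rfl | ⟨t, a, hta⟩
  · exact absurd rfl hne
  · subst hta
    have : a = c := by
      have := congrArg (List.getLast? ·) hpre
      simpa using this
    subst this
    refine ⟨t, ⟨pre, ?_⟩, by simp⟩
    simpa using congrArg List.dropLast hpre

-- the loop invariant of splitOn.go: no occurrence of sep starts inside the current chunk
theorem inv_no_infix (sep cur l : List Char) (hsep : sep ≠ [])
    (hinv : ∀ t, t <:+ cur.reverse → t ≠ [] → ¬ sep <+: (t ++ l)) :
    ¬ sep <:+: cur.reverse := by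
  intro hinf
  obtain ⟨t, hpt, hts⟩ := List.infix_iff_prefix_suffix.mp hinf
  have htne : t ≠ [] := by
    intro h; subst h; exact hsep (List.prefix_nil.mp hpt)
  exact hinv t hts htne (hpt.trans (List.prefix_append t l))

theorem go_no_sep (sep : List Char) (hsep : sep ≠ []) :
    ∀ fuel l cur acc, l.length < fuel →
      (∀ t, t <:+ cur.reverse → t ≠ [] → ¬ sep <+: (t ++ l)) →
      (∀ p ∈ acc, ¬ sep <:+: p) →
      ∀ p ∈ PySem.Chars.splitOn.go sep fuel l cur acc, ¬ sep <:+: p := by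
  intro fuel
  induction fuel with
  | zero => intro l cur acc hlt; omega
  | succ fuel ih =>
    intro l cur acc hlt hinv hacc p hp
    cases l with
    | nil =>
      rw [PySem.Chars.splitOn.go] at hp
      simp only [List.mem_reverse, List.mem_cons] at hp
      rcases hp with rfl | hp
      · exact inv_no_infix sep cur [] hsep hinv
      · exact hacc p hp
      · omega
    | cons c rest =>
      rw [PySem.Chars.splitOn.go] at hp
      by_cases hpre : sep.isPrefixOf (c :: rest) = true
      · simp only [hpre, if_true] at hp
        refine ih (List.drop sep.length (c :: rest)) [] (cur.reverse :: acc) ?_ ?_ ?_ p hp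
        · have h1 : 1 ≤ sep.length := by
            cases sep with
            | nil => exact absurd rfl hsep
            | cons a b => simp
          simp only [List.length_drop, List.length_cons] at *
          omega
        · intro t ht htne; simp at ht; exact absurd ht htne
        · intro q hq
          rcases List.mem_cons.mp hq with rfl | hq
          · exact inv_no_infix sep cur (c :: rest) hsep hinv
          · exact hacc q hq
      · simp only [hpre, if_false, Bool.false_eq_true] at hp
        refine ih rest (c :: cur) acc ?_ ?_ hacc p hp
        · simp only [List.length_cons] at hlt; omega
        · intro t' ht' htne hsp
          simp only [List.reverse_cons] at ht'
          obtain ⟨t, hts, rfl⟩ := suffix_concat_struct t' cur.reverse c ht' htne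
          have hsp' : sep <+: (t ++ (c :: rest)) := by
            simpa using hsp
          by_cases htn : t = []
          · subst htn
            simp only [List.nil_append] at hsp'
            rw [← List.isPrefixOf_iff_prefix] at hsp'
            simp [hsp'] at hpre
          · exact hinv t hts htn hsp'

-- the crux: no piece produced by split('&&') contains '&&' again
theorem splitOn_no_sep (sep : List Char) (hsep : sep ≠ []) (s : List Char) :
    ∀ p ∈ PySem.Chars.splitOn s sep, PySem.Chars.isIn sep p = false := by
  intro p hp
  rw [PySem.Chars.isIn_eq_false_iff]
  refine go_no_sep sep hsep (s.length + 1) s [] [] (by omega) ?_ (by simp) p ?_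
  · intro t ht htne; simp at ht; exact absurd ht htne
  · simpa [PySem.Chars.splitOn] using hp

theorem length_ge_two_of_isIn (item : List Char)
    (h : PySem.Chars.isIn "&&".toList item = true) : 2 ≤ item.length := by
  have h2 := ((PySem.Chars.isIn_iff_infix _ _).mp h).length_le
  simpa using h2

theorem defineA_eq_defineB (item : List Char) :
    defineA (item.length + 1) item = defineB item := by
  rw [defineA, defineB]
  by_cases h : PySem.Chars.isIn "&&".toList item = true
  · simp only [h, Bool.true_eq_false, if_false, if_true]
    congr 1
    congr 1
    congr 1
    apply List.map_congr_left
    intro p hp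
    have hno : PySem.Chars.isIn "&&".toList p = false :=
      splitOn_no_sep "&&".toList (by decide) item p hp
    obtain ⟨k, hk⟩ : ∃ k, item.length = k + 1 := by
      have := length_ge_two_of_isIn item h
      exact ⟨item.length - 1, by omega⟩
    rw [hk, defineA, hno]
    simp
  · have h' : PySem.Chars.isIn ['&', '&'] item = false := by
      simpa using h
    simp [h']

-- ===== VERDICT (by name: the statement is the Claim_ definition above) =====
theorem format_defined_spec : Claim_equal_format_defined := by
  intro items indent _
  show format_defined items indent = format_defined_alt items indent
  unfold format_defined format_defined_alt
  simp only []
  congr 1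
  congr 1
  apply List.map_congr_left
  intro item _
  exact defineA_eq_defineB item.toList
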